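-- pv_equiv track=rewrite | github.com/dengzeyu/ResearchPulse | src/insights.py | _parse_hot_topics
-- ===== SOURCE A (Python) =====
-- from typing import Dict, Any, List
--
-- def _parse_hot_topics(response: str) -> List[Dict[str, Any]]:
--     """Parse hot topics from LLM response."""
--     topics = []
--     lines = response.split('\n')
--
--     current_topic = {}
--     for line in lines:
--         line = line.strip()
--
--         if line.startswith('**') and line.endswith('**'):
--             if current_topic:
--                 topics.append(current_topic)
--             current_topic = {'name': line.strip('*').strip()}
--
--         elif line.startswith('Summary:'):
--             current_topic['summary'] = line.replace('Summary:', '').strip()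
--
--         elif line.startswith('Evidence:'):
--             current_topic['evidence'] = line.replace('Evidence:', '').strip()
--
--     if current_topic:
--         topics.append(current_topic)
--
--     return topics
-- ===== SOURCE B (Python) =====
-- from typing import Dict, Any, List
--
-- def _parse_hot_topics(response: str) -> List[Dict[str, Any]]:
--     """Parse hot topics: partition stripped lines into header-led segments, then build one dict per segment."""
--     def is_header(line):
--         return line.startswith('**') and line.endswith('**')
--
--     def topic_of(segment):
--         d = {}
--         for line in segment:
--             if is_header(line):
--                 d['name'] = line.strip('*').strip()
--             elif line.startswith('Summary:'):
--                 d['summary'] = line.replace('Summary:', '').strip()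
--             elif line.startswith('Evidence:'):
--                 d['evidence'] = line.replace('Evidence:', '').strip()
--         return d
--
--     lines = [line.strip() for line in response.split('\n')]
--     segments = []
--     segment = []
--     for line in lines:
--         if is_header(line):
--             segments.append(segment)
--             segment = [line]
--         else:
--             segment.append(line)
--     segments.append(segment)
--     return [d for d in map(topic_of, segments) if d]
-- ===== Notes on version B (the rewrite author's own statement) =====
-- stated objective: alternative
-- what changed: A's single loop that mutates a current_topic dict and flushes it on each header is replaced by a two-pass decomposition: partition the stripped lines into header-led segments, then build one dict per segment and keep the non-empty ones.
import Mathlib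
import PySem

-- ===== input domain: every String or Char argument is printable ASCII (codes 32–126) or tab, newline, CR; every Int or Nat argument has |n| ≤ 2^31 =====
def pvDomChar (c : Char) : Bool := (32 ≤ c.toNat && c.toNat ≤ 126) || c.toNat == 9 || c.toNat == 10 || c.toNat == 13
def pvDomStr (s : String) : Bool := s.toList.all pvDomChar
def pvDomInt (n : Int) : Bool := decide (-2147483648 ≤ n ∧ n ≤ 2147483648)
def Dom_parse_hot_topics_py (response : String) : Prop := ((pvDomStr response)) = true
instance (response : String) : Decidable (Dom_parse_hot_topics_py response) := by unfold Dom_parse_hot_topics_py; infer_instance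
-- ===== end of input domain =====

-- B re-decomposes A's single flush-on-header loop into two passes (partition stripped lines into
-- header-led segments, then one dict per segment); same result, objective: alternative decomposition.

-- ===== PORT A =====
-- A's loop body after `line = line.strip()`: state = (topics, current_topic)
def pvBodyA (st : List (List (String × String)) × PySem.Dict String String) (line : String) :
    List (List (String × String)) × PySem.Dict String String :=
  if PySem.Str.startswith line "**" && PySem.Str.endswith line "**" then
    ((if st.2.size != 0 then st.1 ++ [st.2.items] else st.1),
      (PySem.Dict.empty : PySem.Dict String String).insert "name"
        (PySem.Str.strip (PySem.Str.stripChars line "*")))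
  else if PySem.Str.startswith line "Summary:" then
    (st.1, st.2.insert "summary" (PySem.Str.strip (PySem.Str.replace line "Summary:" "")))
  else if PySem.Str.startswith line "Evidence:" then
    (st.1, st.2.insert "evidence" (PySem.Str.strip (PySem.Str.replace line "Evidence:" "")))
  else st

-- one full step of A's for-loop (strip, then the branch chain)
def pvStepA (st : List (List (String × String)) × PySem.Dict String String) (line0 : String) :
    List (List (String × String)) × PySem.Dict String String :=
  pvBodyA st (PySem.Str.strip line0)

def parse_hot_topics_py (response : String) : List (List (String × String)) :=
  let lines := (PySem.Chars.splitOn response.toList ['\n']).map String.ofList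
  let st := lines.foldl pvStepA ([], PySem.Dict.empty)
  if st.2.size != 0 then st.1 ++ [st.2.items] else st.1

-- ===== PORT B =====
def pvIsHeader (line : String) : Bool :=
  PySem.Str.startswith line "**" && PySem.Str.endswith line "**"

-- body of topic_of's loop
def pvTopicStep (d : PySem.Dict String String) (line : String) : PySem.Dict String String :=
  if pvIsHeader line then
    d.insert "name" (PySem.Str.strip (PySem.Str.stripChars line "*"))
  else if PySem.Str.startswith line "Summary:" then
    d.insert "summary" (PySem.Str.strip (PySem.Str.replace line "Summary:" ""))
  else if PySem.Str.startswith line "Evidence:" then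
    d.insert "evidence" (PySem.Str.strip (PySem.Str.replace line "Evidence:" ""))
  else d

def pvTopicOf (segment : List String) : PySem.Dict String String :=
  segment.foldl pvTopicStep PySem.Dict.empty

-- body of the partition loop: state = (segments, segment)
def pvSegStep (p : List (List String) × List String) (line : String) :
    List (List String) × List String :=
  if pvIsHeader line then (p.1 ++ [p.2], [line]) else (p.1, p.2 ++ [line])

def parse_hot_topics_py_alt (response : String) : List (List (String × String)) :=
  let lines := ((PySem.Chars.splitOn response.toList ['\n']).map String.ofList).map PySem.Str.strip
  let p := lines.foldl pvSegStep ([], [])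
  let segments := p.1 ++ [p.2]
  ((segments.map pvTopicOf).filter (fun d => d.size != 0)).map PySem.Dict.items

-- ===== PRECONDITION & SPEC =====
def Spec_parse_hot_topics_py (response : String) (out : List (List (String × String))) : Prop := out = parse_hot_topics_py_alt response
instance (response : String) (out : List (List (String × String))) : Decidable (Spec_parse_hot_topics_py response out) := by unfold Spec_parse_hot_topics_py; infer_instance

-- ===== CLAIM (what is proved, stated in full; the proofs are below) =====
def Claim_equal_parse_hot_topics_py : Prop := ∀ (response : String), Dom_parse_hot_topics_py response → Spec_parse_hot_topics_py response (parse_hot_topics_py response)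

-- ===== LEMMAS AND PROOFS =====

-- recursive form of B's partition loop
def pvSegments : List String → List String → List (List String)
  | [], seg => [seg]
  | l :: ls, seg => if pvIsHeader l then seg :: pvSegments ls [l] else pvSegments ls (seg ++ [l])

-- B's output on a list of segments
def pvEmit (xs : List (List String)) : List (List (String × String)) :=
  ((xs.map pvTopicOf).filter (fun d => d.size != 0)).map PySem.Dict.items

lemma pvSeg_foldl (ls : List String) : ∀ (segs : List (List String)) (seg : List String),
    (ls.foldl pvSegStep (segs, seg)).1 ++ [(ls.foldl pvSegStep (segs, seg)).2]
      = segs ++ pvSegments ls seg := by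
  induction ls with
  | nil => intro segs seg; simp [pvSegments]
  | cons l ls ih =>
    intro segs seg
    simp only [List.foldl_cons, pvSegStep, pvSegments]
    by_cases h : pvIsHeader l = true
    · simp [h, ih]
    · simp [h, ih]

lemma pvTopicOf_append (seg : List String) (l : String) :
    pvTopicOf (seg ++ [l]) = pvTopicStep (pvTopicOf seg) l := by
  simp [pvTopicOf]

lemma pvEmit_cons (x : List String) (xs : List (List String)) :
    pvEmit (x :: xs)
      = (if (pvTopicOf x).size != 0 then [(pvTopicOf x).items] else []) ++ pvEmit xs := by
  simp only [pvEmit, List.map_cons, List.filter_cons]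
  by_cases h : (pvTopicOf x).size != 0 <;> simp [h]

-- A's loop body agrees with B's per-segment step
lemma pvBodyA_header (st : List (List (String × String)) × PySem.Dict String String)
    (l : String) (h : pvIsHeader l = true) :
    pvBodyA st l = ((if st.2.size != 0 then st.1 ++ [st.2.items] else st.1), pvTopicOf [l]) := by
  obtain ⟨t, d⟩ := st
  simp only [pvIsHeader] at h
  simp only [pvBodyA, pvTopicOf, List.foldl_cons, List.foldl_nil, pvTopicStep, pvIsHeader, h,
    if_true]

lemma pvBodyA_not_header (st : List (List (String × String)) × PySem.Dict String String)
    (l : String) (h : pvIsHeader l = false) :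
    pvBodyA st l = (st.1, pvTopicStep st.2 l) := by
  obtain ⟨t, d⟩ := st
  simp only [pvIsHeader] at h
  simp only [pvBodyA, pvTopicStep, pvIsHeader, h, Bool.false_eq_true, if_false]
  split <;> [rfl; split <;> rfl]

-- A's loop (on stripped lines) + final flush = acc ++ B's per-segment output
lemma pvMain (ls : List String) : ∀ (acc : List (List (String × String))) (seg : List String),
    (let st := ls.foldl pvBodyA (acc, pvTopicOf seg)
     if st.2.size != 0 then st.1 ++ [st.2.items] else st.1)
      = acc ++ pvEmit (pvSegments ls seg) := by
  induction ls with
  | nil =>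
    intro acc seg
    simp only [List.foldl_nil, pvSegments, pvEmit]
    by_cases h : (pvTopicOf seg).size != 0 <;> simp [h]
  | cons l ls ih =>
    intro acc seg
    simp only [List.foldl_cons]
    by_cases h : pvIsHeader l = true
    · rw [pvBodyA_header _ _ h, ih, pvSegments]
      simp only [h, if_true, pvEmit_cons]
      by_cases h2 : (pvTopicOf seg).size != 0 <;> simp [h2]
    · rw [pvBodyA_not_header _ _ (by simpa using h), ← pvTopicOf_append, ih, pvSegments]
      simp [h]

-- ===== VERDICT (by name: the statement is the Claim_ definition above) =====
theorem parse_hot_topics_py_spec : Claim_equal_parse_hot_topics_py := by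
  intro response _
  unfold Spec_parse_hot_topics_py parse_hot_topics_py parse_hot_topics_py_alt
  simp only
  rw [show pvStepA = fun st l => pvBodyA st (PySem.Str.strip l) from rfl,
    ← List.foldl_map (f := PySem.Str.strip) (g := pvBodyA)]
  rw [show (PySem.Dict.empty : PySem.Dict String String) = pvTopicOf [] from rfl]
  rw [pvMain, pvSeg_foldl]
  rfl
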